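-- pv_equiv track=rewrite | github.com/YunTianZhou/LeetcodeContest | Weekly Contest 463/3654. Minimum Sum After Divisible Sum Deletions.py | minArraySum
-- ===== SOURCE A (Python) =====
-- from typing import List
--
-- def minArraySum(nums: List[int], k: int) -> int:
--     n = len(nums)
--
--     ps = [0] * (n + 1)
--     ps[0] = nums[0]
--     for i in range(1, n):
--         ps[i] = nums[i] + ps[i - 1]
--
--     last = [-2] * k
--     last[0] = -1
--     dp = [0] * (n + 1)
--     for i in range(n):
--         dp[i] = dp[i - 1]
--         j = last[ps[i] % k]
--         if j != -2:
--             dp[i] = max(dp[i], ps[i] - ps[j] + dp[j])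
--         last[ps[i] % k] = i
--
--     return sum(nums) - dp[n - 1]
-- ===== SOURCE B (Python) =====
-- from typing import List
--
-- def minArraySum(nums: List[int], k: int) -> int:
--     s = 0          # prefix sum
--     m = 0          # minimum possible remaining sum of the processed prefix
--     best = {0: 0}  # best[r] = min remaining at the latest prefix whose sum has residue r (mod k)
--     for x in nums:
--         s += x
--         m += x
--         r = s % k
--         if r in best and best[r] < m:
--             m = best[r]
--         best[r] = m
--     return m
-- ===== Notes on version B (the rewrite author's own statement) =====
-- stated objective: simpler
-- what changed: Replaces A's three precomputed arrays (prefix sums ps, last-occurrence table last, dp that maximizes the deleted sum, subtracted from the total at the end) by a single forward pass with two scalars (running prefix sum s, minimum remaining sum m) and one dictionary best keyed by prefix-sum residue, minimizing the remaining sum directly.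
import Mathlib
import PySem

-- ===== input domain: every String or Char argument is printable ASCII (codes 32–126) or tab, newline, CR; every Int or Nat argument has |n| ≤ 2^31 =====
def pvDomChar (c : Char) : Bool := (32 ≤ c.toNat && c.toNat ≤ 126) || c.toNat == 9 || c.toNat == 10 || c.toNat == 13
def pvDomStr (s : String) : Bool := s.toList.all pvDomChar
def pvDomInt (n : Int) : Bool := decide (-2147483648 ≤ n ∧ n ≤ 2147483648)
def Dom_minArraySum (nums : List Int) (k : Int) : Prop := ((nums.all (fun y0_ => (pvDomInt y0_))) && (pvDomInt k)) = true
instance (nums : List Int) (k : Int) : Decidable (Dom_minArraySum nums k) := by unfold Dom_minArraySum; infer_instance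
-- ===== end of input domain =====

-- B replaces A's three arrays (prefix sums, last-occurrence table, dp maximizing the deleted
-- sum, subtracted from the total) by one forward pass with two scalars and a dict keyed by
-- prefix-sum residue, minimizing the remaining sum directly (objective: simpler).

-- ===== PORT A =====
-- body of A's second loop (i-th iteration, state = (dp, last)); ps is the precomputed prefix-sum array
def aStep (ps : List Int) (k : Int) (st : List Int × List Int) (i : Int) : List Int × List Int :=
  -- dp[i] = dp[i - 1]
  let dp := PySem.List.pySetD st.1 i (PySem.List.pyGetD st.1 (i - 1) 0)
  -- j = last[ps[i] % k]
  let r := PySem.Int.mod (PySem.List.pyGetD ps i 0) k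
  let j := PySem.List.pyGetD st.2 r 0
  -- if j != -2: dp[i] = max(dp[i], ps[i] - ps[j] + dp[j])
  let dp := if j ≠ -2 then
      PySem.List.pySetD dp i
        (max (PySem.List.pyGetD dp i 0)
             (PySem.List.pyGetD ps i 0 - PySem.List.pyGetD ps j 0 + PySem.List.pyGetD dp j 0))
    else dp
  -- last[ps[i] % k] = i
  (dp, PySem.List.pySetD st.2 r i)

-- A's first loop: ps = [0]*(n+1); ps[0] = nums[0]; for i in range(1, n): ps[i] = nums[i] + ps[i-1]
def psList (nums : List Int) : List Int :=
  let ps : List Int := List.replicate (nums.length + 1) 0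
  let ps := PySem.List.pySetD ps 0 (PySem.List.pyGetD nums 0 0)
  (PySem.List.pyRange 1 (nums.length : Int) 1).foldl
    (fun p i => PySem.List.pySetD p i (PySem.List.pyGetD nums i 0 + PySem.List.pyGetD p (i - 1) 0)) ps

def minArraySum (nums : List Int) (k : Int) : Int :=
  let n : Int := (nums.length : Int)
  let ps := psList nums
  -- last = [-2] * k; last[0] = -1
  let last := PySem.List.pySetD (List.replicate k.toNat (-2)) 0 (-1)
  -- dp = [0] * (n + 1)
  let dp : List Int := List.replicate (nums.length + 1) 0
  let st := (PySem.List.pyRange 0 n 1).foldl (aStep ps k) (dp, last)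
  -- return sum(nums) - dp[n - 1]
  nums.sum - PySem.List.pyGetD st.1 (n - 1) 0

-- ===== PORT B =====
-- body of B's loop; state = (s, m, best)
def bStep (k : Int) (st : Int × Int × PySem.Dict Int Int) (x : Int) : Int × Int × PySem.Dict Int Int :=
  let s := st.1 + x
  let m := st.2.1 + x
  let r := PySem.Int.mod s k
  -- if r in best and best[r] < m: m = best[r]
  let m := match st.2.2.get? r with
    | some v => if v < m then v else m
    | none => m
  (s, m, st.2.2.insert r m)

def minArraySum_alt (nums : List Int) (k : Int) : Int :=
  (nums.foldl (bStep k) (0, 0, PySem.Dict.empty.insert 0 0)).2.1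

-- ===== PRECONDITION & SPEC =====
-- A raises IndexError on empty nums (ps[0] = nums[0]) and on k ≤ 0 (last[0] into [-2]*k = []).
def Pre_minArraySum (nums : List Int) (k : Int) : Prop := nums ≠ [] ∧ 1 ≤ k
instance (nums : List Int) (k : Int) : Decidable (Pre_minArraySum nums k) := by
  unfold Pre_minArraySum; infer_instance

def pvWitness_minArraySum : List Int × Int := ([3, 1, 2, -4], 3)

def Spec_minArraySum (nums : List Int) (k : Int) (out : Int) : Prop := out = minArraySum_alt nums k
instance (nums : List Int) (k : Int) (out : Int) : Decidable (Spec_minArraySum nums k out) := by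
  unfold Spec_minArraySum; infer_instance

-- ===== CLAIM (what is proved, stated in full; the proofs are below) =====
def Claim_equal_minArraySum : Prop := ∀ (nums : List Int) (k : Int), Dom_minArraySum nums k →
  Pre_minArraySum nums k → Spec_minArraySum nums k (minArraySum nums k)

-- ===== LEMMAS AND PROOFS =====

-- sum of the first t elements
def pfx (nums : List Int) (t : Nat) : Int := (nums.take t).sum

-- the "minimum remaining sum" value after u elements, read off A's dp array
def remVal (nums : List Int) (dp : List Int) (u : Nat) : Int :=
  pfx nums u - (if u = 0 then 0 else dp.getD (u - 1) 0)

-- the simulation relation between A's loop state (dp, last) and B's loop state (s, m, best)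
-- after t elements have been processed
def SimRel (nums : List Int) (k : Int) (t : Nat) (a : List Int × List Int)
    (b : Int × Int × PySem.Dict Int Int) : Prop :=
  a.1.length = nums.length + 1 ∧
  a.2.length = k.toNat ∧
  (∀ u : Nat, t ≤ u → u ≤ nums.length → a.1.getD u 0 = 0) ∧
  b.1 = pfx nums t ∧
  b.2.1 = remVal nums a.1 t ∧
  (∀ r : Int, 0 ≤ r → r < k →
    (a.2.getD r.toNat 0 = -2 ∧ b.2.2.get? r = none) ∨
    (∃ u : Nat, u ≤ t ∧ a.2.getD r.toNat 0 = (u : Int) - 1 ∧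
      b.2.2.get? r = some (remVal nums a.1 u)))

lemma getD_set_self (xs : List Int) (i : Nat) (v d : Int) (h : i < xs.length) :
    (xs.set i v).getD i d = v := by
  simp [List.getD_eq_getElem?_getD, h]

lemma getD_set_ne (xs : List Int) (i j : Nat) (v d : Int) (h : i ≠ j) :
    (xs.set i v).getD j d = xs.getD j d := by
  simp [List.getD_eq_getElem?_getD, List.getElem?_set_ne, h]

lemma getD_replicate' (n : Nat) (a d : Int) (u : Nat) (h : u < n) :
    (List.replicate n a).getD u d = a := by
  simp [List.getD_eq_getElem?_getD, h]

lemma pyGetD_idx (xs : List Int) (r d : Int) (h0 : 0 ≤ r) (h : r.toNat < xs.length) :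
    PySem.List.pyGetD xs r d = xs.getD r.toNat d := by
  rw [PySem.List.pyGetD_eq_getElem xs d h0 (by omega)]
  simp [List.getD_eq_getElem?_getD, List.getElem?_eq_getElem h]

lemma pyGetD_negone (xs : List Int) (d : Int) (h : xs ≠ []) :
    PySem.List.pyGetD xs (-1) d = xs.getD (xs.length - 1) d := by
  have hl : xs.length - 1 < xs.length := Nat.sub_lt (List.length_pos_of_ne_nil h) one_pos
  rw [PySem.List.pyGetD_neg_one xs d h, List.getLast_eq_getElem,
      List.getD_eq_getElem?_getD, List.getElem?_eq_getElem hl]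
  rfl

lemma pySetD_zero (xs : List Int) (v : Int) : PySem.List.pySetD xs 0 v = xs.set 0 v := by
  rw [PySem.List.pySetD_of_nonneg xs v (by norm_num)]
  norm_num

lemma pfx_succ (nums : List Int) (t : Nat) (ht : t < nums.length) :
    pfx nums (t + 1) = pfx nums t + nums.getD t 0 := by
  unfold pfx
  rw [List.take_succ, List.sum_append, List.getElem?_eq_getElem ht]
  simp [List.getD_eq_getElem?_getD, List.getElem?_eq_getElem ht]

lemma pfx_one (nums : List Int) (h : nums ≠ []) : pfx nums 1 = nums.getD 0 0 := by
  cases nums with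
  | nil => simp at h
  | cons a l => simp [pfx]

-- A's first loop, stopped after the indices 1..b-1 have been written
def psAux (nums : List Int) (b : Nat) : List Int :=
  (PySem.List.pyRange 1 (b : Int) 1).foldl
    (fun p i => PySem.List.pySetD p i (PySem.List.pyGetD nums i 0 + PySem.List.pyGetD p (i - 1) 0))
    (PySem.List.pySetD (List.replicate (nums.length + 1) 0) 0 (PySem.List.pyGetD nums 0 0))

lemma psAux_spec (nums : List Int) (hnums : nums ≠ []) :
    ∀ b : Nat, 1 ≤ b → b ≤ nums.length →
    (psAux nums b).length = nums.length + 1 ∧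
    (∀ u : Nat, u < b → (psAux nums b).getD u 0 = pfx nums (u + 1)) ∧
    (∀ u : Nat, b ≤ u → u ≤ nums.length → (psAux nums b).getD u 0 = 0) := by
  intro b
  induction b with
  | zero => intro h; omega
  | succ b ih =>
    intro _ hble
    by_cases hb : 1 ≤ b
    · -- inductive step: one more iteration of the loop
      have hblt : b < nums.length := by omega
      obtain ⟨ihlen, ihfill, ihzero⟩ := ih hb (by omega)
      have hrange : PySem.List.pyRange 1 ((b + 1 : Nat) : Int) 1
          = PySem.List.pyRange 1 (b : Int) 1 ++ [(b : Int)] := by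
        push_cast
        exact PySem.List.pyRange_one_succ_right (by exact_mod_cast hb)
      have hcast : ((b : Int) - 1) = ((b - 1 : Nat) : Int) := by omega
      have hstep : psAux nums (b + 1)
          = (psAux nums b).set b (nums.getD b 0 + (psAux nums b).getD (b - 1) 0) := by
        unfold psAux
        rw [hrange, List.foldl_append, List.foldl_cons, List.foldl_nil, hcast]
        simp only [PySem.List.pySetD_natCast, PySem.List.pyGetD_natCast]
      have hval : nums.getD b 0 + (psAux nums b).getD (b - 1) 0 = pfx nums (b + 1) := by
        rw [ihfill (b - 1) (by omega), Nat.sub_add_cancel hb, pfx_succ nums b hblt]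
        ring
      rw [hstep]
      refine ⟨by simp [ihlen], ?_, ?_⟩
      · intro u hu
        rcases eq_or_ne u b with he | hne
        · subst he
          rw [getD_set_self _ u _ _ (by omega), hval]
        · rw [getD_set_ne _ b u _ _ (Ne.symm hne)]
          exact ihfill u (by omega)
      · intro u hu1 hu2
        rw [getD_set_ne _ b u _ _ (by omega)]
        exact ihzero u (by omega) hu2
    · -- base case b + 1 = 1: the loop has not run yet
      have hb0 : b = 0 := by omega
      subst hb0
      have hlenpos : 0 < nums.length := List.length_pos_of_ne_nil hnums
      have h1 : psAux nums 1
          = (List.replicate (nums.length + 1) 0).set 0 (nums.getD 0 0) := by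
        unfold psAux
        rw [show ((1 : Nat) : Int) = 1 from rfl, PySem.List.pyRange_one_eq_nil le_rfl,
            List.foldl_nil, pySetD_zero, PySem.List.pyGetD_zero]
      rw [h1]
      refine ⟨by simp, ?_, ?_⟩
      · intro u hu
        have hu0 : u = 0 := by omega
        subst hu0
        rw [getD_set_self _ 0 _ _ (by simp), pfx_one nums hnums]
      · intro u hu1 hu2
        rw [getD_set_ne _ 0 u _ _ (by omega)]
        exact getD_replicate' _ _ _ _ (by omega)

lemma psList_spec (nums : List Int) (hnums : nums ≠ []) :
    (psList nums).length = nums.length + 1 ∧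
    (∀ u : Nat, u < nums.length → (psList nums).getD u 0 = pfx nums (u + 1)) ∧
    (psList nums).getD nums.length 0 = 0 := by
  have e : psList nums = psAux nums nums.length := rfl
  have hlen1 : 1 ≤ nums.length := List.length_pos_of_ne_nil hnums
  obtain ⟨h1, h2, h3⟩ := psAux_spec nums hnums nums.length hlen1 le_rfl
  exact ⟨e ▸ h1, fun u hu => e ▸ h2 u hu, e ▸ h3 nums.length le_rfl le_rfl⟩

lemma simRel_zero (nums : List Int) (k : Int) (hk : 1 ≤ k) :
    SimRel nums k 0 (List.replicate (nums.length + 1) 0,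
        PySem.List.pySetD (List.replicate k.toNat (-2)) 0 (-1))
      (0, 0, PySem.Dict.empty.insert 0 0) := by
  have hk0 : 0 < k.toNat := by omega
  unfold SimRel
  rw [pySetD_zero]
  refine ⟨by simp, by simp, ?_, by simp [pfx], by simp [remVal, pfx], ?_⟩
  · intro u _ hu
    exact getD_replicate' _ _ _ _ (by omega)
  · intro r hr0 hrk
    rcases eq_or_lt_of_le hr0 with h0 | h0
    · right
      refine ⟨0, le_rfl, ?_, ?_⟩
      · rw [← h0]
        rw [show (0 : Int).toNat = 0 from rfl, getD_set_self _ 0 _ _ (by simp [hk0])]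
        norm_num
      · rw [← h0]
        simp [PySem.Dict.get?_insert_self, remVal, pfx]
    · left
      refine ⟨?_, ?_⟩
      · rw [getD_set_ne _ 0 r.toNat _ _ (by omega)]
        exact getD_replicate' _ _ _ _ (by omega)
      · rw [PySem.Dict.get?_insert_of_ne _ _ (by omega : r ≠ 0)]
        exact PySem.Dict.get?_empty r

lemma simRel_step (nums : List Int) (k : Int) (hk : 1 ≤ k) (hnums : nums ≠ [])
    (t : Nat) (ht : t < nums.length) (a : List Int × List Int)
    (b : Int × Int × PySem.Dict Int Int) (h : SimRel nums k t a b) :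
    SimRel nums k (t + 1) (aStep (psList nums) k a (t : Int)) (bStep k b (nums.getD t 0)) := by
  obtain ⟨hdplen, hlastlen, hzero, hs, hm, hres⟩ := h
  obtain ⟨hpslen, hpsfill, hpstop⟩ := psList_spec nums hnums
  have hlenpos : 0 < nums.length := List.length_pos_of_ne_nil hnums
  -- dp[i - 1], read before anything is written
  have hread : PySem.List.pyGetD a.1 ((t : Int) - 1) 0
      = (if t = 0 then 0 else a.1.getD (t - 1) 0) := by
    rcases Nat.eq_zero_or_pos t with h0 | h0
    · subst h0
      have hne : a.1 ≠ [] := by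
        intro hcon; rw [hcon] at hdplen; simp at hdplen
      rw [show ((0 : Nat) : Int) - 1 = -1 by norm_num, pyGetD_negone a.1 0 hne, hdplen]
      simp only [Nat.add_sub_cancel, if_pos rfl]
      exact hzero nums.length (by omega) le_rfl
    · rw [show ((t : Int) - 1) = ((t - 1 : Nat) : Int) by omega, PySem.List.pyGetD_natCast,
          if_neg (by omega)]
  -- ps[i]
  have hpst : PySem.List.pyGetD (psList nums) (t : Int) 0 = pfx nums (t + 1) := by
    rw [PySem.List.pyGetD_natCast]
    exact hpsfill t ht
  have hr0 : (0 : Int) ≤ PySem.Int.mod (pfx nums (t + 1)) k := PySem.Int.mod_nonneg _ (by omega)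
  have hrk : PySem.Int.mod (pfx nums (t + 1)) k < k := PySem.Int.mod_lt _ (by omega)
  have hrlt : (PySem.Int.mod (pfx nums (t + 1)) k).toNat < a.2.length := by
    rw [hlastlen]; omega
  -- B computes the same residue
  have hBr : PySem.Int.mod (b.1 + nums.getD t 0) k = PySem.Int.mod (pfx nums (t + 1)) k := by
    rw [hs, ← pfx_succ nums t ht]
  -- last[ps[i] % k]
  have hjread : PySem.List.pyGetD a.2 (PySem.Int.mod (pfx nums (t + 1)) k) 0
      = a.2.getD (PySem.Int.mod (pfx nums (t + 1)) k).toNat 0 :=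
    pyGetD_idx a.2 _ 0 hr0 hrlt
  -- m + x
  have hm1 : b.2.1 + nums.getD t 0
      = pfx nums (t + 1) - (if t = 0 then 0 else a.1.getD (t - 1) 0) := by
    have hps := pfx_succ nums t ht
    rw [hm]
    unfold remVal
    omega
  -- dp value written by the first assignment, as seen at index t afterwards
  have hdp1t : ((a.1.set t (if t = 0 then 0 else a.1.getD (t - 1) 0)).getD t 0)
      = (if t = 0 then 0 else a.1.getD (t - 1) 0) :=
    getD_set_self _ t _ _ (by omega)
  rcases hres (PySem.Int.mod (pfx nums (t + 1)) k) hr0 hrk with ⟨hL, hB⟩ | ⟨u, hu, hL, hB⟩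
  · -- residue not seen before: A skips the max, B keeps m + x
    have hA : aStep (psList nums) k a (t : Int)
        = (a.1.set t (if t = 0 then 0 else a.1.getD (t - 1) 0),
           a.2.set (PySem.Int.mod (pfx nums (t + 1)) k).toNat (t : Int)) := by
      simp only [aStep]
      rw [hpst, hread, hjread, hL, PySem.List.pySetD_of_nonneg a.2 _ hr0]
      simp [PySem.List.pySetD_natCast]
    have hBstep : bStep k b (nums.getD t 0)
        = (b.1 + nums.getD t 0, b.2.1 + nums.getD t 0,
           b.2.2.insert (PySem.Int.mod (pfx nums (t + 1)) k) (b.2.1 + nums.getD t 0)) := by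
      simp only [bStep]
      rw [hBr, hB]
    rw [hA, hBstep]
    have hrem : remVal nums (a.1.set t (if t = 0 then 0 else a.1.getD (t - 1) 0)) (t + 1)
        = b.2.1 + nums.getD t 0 := by
      unfold remVal
      rw [if_neg (Nat.succ_ne_zero t), Nat.add_sub_cancel, hdp1t, hm1]
    refine ⟨by simp [hdplen], by simp [hlastlen], ?_, ?_, hrem.symm, ?_⟩
    · intro u hu1 hu2
      rw [getD_set_ne _ t u _ _ (by omega)]
      exact hzero u (by omega) hu2
    · rw [hs, ← pfx_succ nums t ht]
    · intro r' hr'0 hr'k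
      by_cases hrr : r' = PySem.Int.mod (pfx nums (t + 1)) k
      · subst hrr
        right
        refine ⟨t + 1, le_rfl, ?_, ?_⟩
        · rw [getD_set_self _ _ _ _ hrlt]
          push_cast; ring
        · rw [PySem.Dict.get?_insert_self, hrem]
      · have htn : r'.toNat ≠ (PySem.Int.mod (pfx nums (t + 1)) k).toNat := by omega
        rw [getD_set_ne _ _ _ _ _ (Ne.symm htn), PySem.Dict.get?_insert_of_ne _ _ hrr]
        rcases hres r' hr'0 hr'k with ⟨h1, h2⟩ | ⟨u, hu, h1, h2⟩
        · exact Or.inl ⟨h1, h2⟩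
        · right
          refine ⟨u, by omega, h1, ?_⟩
          rw [h2]
          congr 1
          unfold remVal
          rcases Nat.eq_zero_or_pos u with h0 | h0
          · simp [h0]
          · rw [if_neg (by omega), if_neg (by omega), getD_set_ne _ t (u - 1) _ _ (by omega)]
  · -- residue seen before at prefix u: A takes the max, B takes the min
    have hune : ((u : Int) - 1) ≠ -2 := by omega
    -- ps[j]
    have hpsne : psList nums ≠ [] := by
      intro hcon; rw [hcon] at hpslen; simp at hpslen
    have hpsj : PySem.List.pyGetD (psList nums) ((u : Int) - 1) 0 = pfx nums u := by
      rcases Nat.eq_zero_or_pos u with h0 | h0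
      · subst h0
        rw [show ((0 : Nat) : Int) - 1 = -1 by norm_num, pyGetD_negone _ 0 hpsne, hpslen]
        simp only [Nat.add_sub_cancel]
        rw [hpstop]
        simp [pfx]
      · rw [show ((u : Int) - 1) = ((u - 1 : Nat) : Int) by omega, PySem.List.pyGetD_natCast,
            hpsfill (u - 1) (by omega), Nat.sub_add_cancel h0]
    -- dp[j] after the first assignment (index j is untouched by the write at t)
    have hdp1j : PySem.List.pyGetD (a.1.set t (if t = 0 then 0 else a.1.getD (t - 1) 0))
          ((u : Int) - 1) 0 = (if u = 0 then 0 else a.1.getD (u - 1) 0) := by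
      rcases Nat.eq_zero_or_pos u with h0 | h0
      · subst h0
        have hne : a.1.set t (if t = 0 then 0 else a.1.getD (t - 1) 0) ≠ [] := by
          intro hcon
          have := congrArg List.length hcon
          simp [hdplen] at this
        rw [show ((0 : Nat) : Int) - 1 = -1 by norm_num, pyGetD_negone _ 0 hne]
        simp only [List.length_set, hdplen, Nat.add_sub_cancel, if_pos rfl]
        rw [getD_set_ne _ t nums.length _ _ (by omega)]
        exact hzero nums.length (by omega) le_rfl
      · rw [show ((u : Int) - 1) = ((u - 1 : Nat) : Int) by omega, PySem.List.pyGetD_natCast,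
            if_neg (by omega), getD_set_ne _ t (u - 1) _ _ (by omega)]
        rw [if_neg (by omega)]
    have hdp1tpy : PySem.List.pyGetD (a.1.set t (if t = 0 then 0 else a.1.getD (t - 1) 0))
          (t : Int) 0 = (if t = 0 then 0 else a.1.getD (t - 1) 0) := by
      rw [PySem.List.pyGetD_natCast, hdp1t]
    have hA : aStep (psList nums) k a (t : Int)
        = ((a.1.set t (if t = 0 then 0 else a.1.getD (t - 1) 0)).set t
             (max (if t = 0 then 0 else a.1.getD (t - 1) 0)
                  (pfx nums (t + 1) - pfx nums u + (if u = 0 then 0 else a.1.getD (u - 1) 0))),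
           a.2.set (PySem.Int.mod (pfx nums (t + 1)) k).toNat (t : Int)) := by
      simp only [aStep]
      rw [hpst, hread, hjread, hL, PySem.List.pySetD_of_nonneg a.2 _ hr0]
      rw [if_pos hune]
      simp only [PySem.List.pySetD_natCast]
      rw [hdp1tpy, hpsj, hdp1j]
    have hBstep : bStep k b (nums.getD t 0)
        = (b.1 + nums.getD t 0,
           (if remVal nums a.1 u < b.2.1 + nums.getD t 0 then remVal nums a.1 u
            else b.2.1 + nums.getD t 0),
           b.2.2.insert (PySem.Int.mod (pfx nums (t + 1)) k)
             (if remVal nums a.1 u < b.2.1 + nums.getD t 0 then remVal nums a.1 u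
              else b.2.1 + nums.getD t 0)) := by
      simp only [bStep]
      rw [hBr, hB]
    have hvB : remVal nums a.1 u = pfx nums u - (if u = 0 then 0 else a.1.getD (u - 1) 0) := rfl
    -- B's min is A's max, subtracted from the running prefix sum
    have hminmax : (if remVal nums a.1 u < b.2.1 + nums.getD t 0 then remVal nums a.1 u
          else b.2.1 + nums.getD t 0)
        = pfx nums (t + 1)
          - max (if t = 0 then 0 else a.1.getD (t - 1) 0)
                (pfx nums (t + 1) - pfx nums u + (if u = 0 then 0 else a.1.getD (u - 1) 0)) := by
      have harith : ∀ P Q dpo dpw : Int,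
          (if Q - dpw < P - dpo then Q - dpw else P - dpo) = P - max dpo (P - Q + dpw) := by
        intro P Q dpo dpw
        rcases le_total dpo (P - Q + dpw) with hlc | hlc
        · rw [max_eq_right hlc]
          split_ifs with hcond <;> linarith
        · rw [max_eq_left hlc]
          split_ifs with hcond <;> linarith
      rw [hvB, hm1]
      exact harith _ _ _ _
    rw [hA, hBstep, hminmax]
    have hrem : remVal nums
        ((a.1.set t (if t = 0 then 0 else a.1.getD (t - 1) 0)).set t
          (max (if t = 0 then 0 else a.1.getD (t - 1) 0)
               (pfx nums (t + 1) - pfx nums u + (if u = 0 then 0 else a.1.getD (u - 1) 0)))) (t + 1)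
        = pfx nums (t + 1)
          - max (if t = 0 then 0 else a.1.getD (t - 1) 0)
                (pfx nums (t + 1) - pfx nums u + (if u = 0 then 0 else a.1.getD (u - 1) 0)) := by
      unfold remVal
      rw [if_neg (Nat.succ_ne_zero t), Nat.add_sub_cancel,
          getD_set_self _ t _ _ (by simp only [List.length_set, hdplen]; omega)]
    refine ⟨by simp [hdplen], by simp [hlastlen], ?_, ?_, hrem.symm, ?_⟩
    · intro w hw1 hw2
      rw [getD_set_ne _ t w _ _ (by omega), getD_set_ne _ t w _ _ (by omega)]
      exact hzero w (by omega) hw2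
    · rw [hs, ← pfx_succ nums t ht]
    · intro r' hr'0 hr'k
      by_cases hrr : r' = PySem.Int.mod (pfx nums (t + 1)) k
      · subst hrr
        right
        refine ⟨t + 1, le_rfl, ?_, ?_⟩
        · rw [getD_set_self _ _ _ _ hrlt]
          push_cast; ring
        · rw [PySem.Dict.get?_insert_self, hrem]
      · have htn : r'.toNat ≠ (PySem.Int.mod (pfx nums (t + 1)) k).toNat := by omega
        rw [getD_set_ne _ _ _ _ _ (Ne.symm htn), PySem.Dict.get?_insert_of_ne _ _ hrr]
        rcases hres r' hr'0 hr'k with ⟨h1, h2⟩ | ⟨w, hw, h1, h2⟩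
        · exact Or.inl ⟨h1, h2⟩
        · right
          refine ⟨w, by omega, h1, ?_⟩
          rw [h2]
          congr 1
          unfold remVal
          rcases Nat.eq_zero_or_pos w with h0 | h0
          · simp [h0]
          · rw [if_neg (by omega), if_neg (by omega),
                getD_set_ne _ t (w - 1) _ _ (by omega), getD_set_ne _ t (w - 1) _ _ (by omega)]

lemma simRel_all (nums : List Int) (k : Int) (hnums : nums ≠ []) (hk : 1 ≤ k) :
    ∀ t : Nat, t ≤ nums.length →
      SimRel nums k t
        ((PySem.List.pyRange 0 (t : Int) 1).foldl (aStep (psList nums) k)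
          (List.replicate (nums.length + 1) 0,
           PySem.List.pySetD (List.replicate k.toNat (-2)) 0 (-1)))
        ((nums.take t).foldl (bStep k) (0, 0, PySem.Dict.empty.insert 0 0)) := by
  intro t
  induction t with
  | zero =>
    intro _
    rw [show ((0 : Nat) : Int) = 0 from rfl, PySem.List.pyRange_one_eq_nil le_rfl]
    simp only [List.foldl_nil, List.take_zero]
    exact simRel_zero nums k hk
  | succ t ih =>
    intro hle
    have ht : t < nums.length := by omega
    have hr : PySem.List.pyRange 0 ((t + 1 : Nat) : Int) 1
        = PySem.List.pyRange 0 (t : Int) 1 ++ [(t : Int)] := by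
      push_cast
      exact PySem.List.pyRange_one_succ_right (by positivity)
    have htake : nums.take (t + 1) = nums.take t ++ [nums.getD t 0] := by
      rw [List.take_succ, List.getElem?_eq_getElem ht]
      simp [List.getD_eq_getElem?_getD, List.getElem?_eq_getElem ht]
    rw [hr, htake, List.foldl_append, List.foldl_append]
    simp only [List.foldl_cons, List.foldl_nil]
    exact simRel_step nums k hk hnums t ht _ _ (ih (by omega))

-- ===== VERDICT (by name: the statement is the Claim_ definition above) =====
theorem minArraySum_spec : Claim_equal_minArraySum := by
  intro nums k _ hpre
  obtain ⟨hne, hk⟩ := hpre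
  unfold Spec_minArraySum
  have hlen : 0 < nums.length := List.length_pos_of_ne_nil hne
  have H := simRel_all nums k hne hk nums.length le_rfl
  rw [List.take_length] at H
  obtain ⟨hdplen, -, -, -, hm, -⟩ := H
  simp only [minArraySum, minArraySum_alt]
  rw [show ((nums.length : Int) - 1) = ((nums.length - 1 : Nat) : Int) by omega,
      PySem.List.pyGetD_natCast, hm]
  unfold remVal
  rw [if_neg (by omega), show pfx nums nums.length = nums.sum by rw [pfx, List.take_length]]
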